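-- pv_equiv track=rewrite | github.com/jalavosus/yu_class_schedule_parser | prerequisite_parser.py | get_course_subjects
-- ===== SOURCE A (Python) =====
-- def get_course_subjects(named_indices, unnamed_indices, prereq_string):
-- 	""" Let's play a game called 'How the fuck do I document this?'
--
-- 	Finds the (lookbehind) closest course with a subject (ex. ACC 1001) to
-- 	the course without a subject (ex. 1002, for each un-subjected course.
--
-- 	Prerequisite lists will often list prereqs as "ACC 1001 and 1002" which
-- 	is really annoying for people who want to parse prereqs out of a string.
-- 	So, I do some strange looping to give subjects to course numbers which
-- 	lack them.
-- 	"""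
-- 	newly_named_courses = []
--
-- 	for un_index in unnamed_indices:
-- 		closest_index = [ nc_index for nc_index in named_indices if nc_index[1] < un_index[0] ]
-- 		if len(closest_index) > 0:
-- 			closest_index = closest_index[-1]
-- 			recent_name = prereq_string[closest_index[0]:closest_index[1]]
-- 		else:
-- 			continue
-- 		subject = parse_out_subject(recent_name)
-- 		fresh_course = f"{subject} {prereq_string[un_index[0]:un_index[1]]}"
--
-- 		newly_named_courses.append(fresh_course)
--
-- 	return newly_named_courses
--
-- def parse_out_subject(course_name):
-- 	return course_name.split(" ")[0]
-- ===== SOURCE B (Python) =====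
-- def get_course_subjects(named_indices, unnamed_indices, prereq_string):
-- 	"""Same result as A by a different route: one pass builds suffix-minimum
-- 	end positions over named_indices; each unnamed course then binary-searches
-- 	for the last named index whose end lies before its start."""
-- 	if not named_indices or not unnamed_indices:
-- 		return []
-- 	n = len(named_indices)
-- 	# suffmin[i] = min of named_indices[j][1] for j >= i (non-decreasing in i)
-- 	suffmin = [0] * n
-- 	m = None
-- 	for i in range(n - 1, -1, -1):
-- 		e = named_indices[i][1]
-- 		m = e if m is None or e < m else m
-- 		suffmin[i] = m
-- 	results = []
-- 	for un in unnamed_indices: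
-- 		s = un[0]
-- 		# largest i with named_indices[i][1] < s is lo-1, where lo is the
-- 		# bisect_left point of s in the non-decreasing suffmin array
-- 		lo, hi = 0, n
-- 		while lo < hi:
-- 			mid = (lo + hi) // 2
-- 			if suffmin[mid] < s:
-- 				lo = mid + 1
-- 			else:
-- 				hi = mid
-- 		if lo == 0:
-- 			continue
-- 		c = named_indices[lo - 1]
-- 		subject = prereq_string[c[0]:c[1]].split(" ")[0]
-- 		results.append(f"{subject} {prereq_string[un[0]:un[1]]}")
-- 	return results
-- ===== Notes on version B (the rewrite author's own statement) =====
-- stated objective: alternative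
-- what changed: A rescans all of named_indices for every unnamed course and keeps the whole filtered list; B precomputes a suffix-minimum array of named end positions once and answers each unnamed course with a hand-written bisect_left binary search over it (plus a natural early return when either list is empty); asymptotically lighter in the index lists, but a timing run did not consistently confirm a >=1.5x end-to-end win, so no speed is claimed.
import Mathlib
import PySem

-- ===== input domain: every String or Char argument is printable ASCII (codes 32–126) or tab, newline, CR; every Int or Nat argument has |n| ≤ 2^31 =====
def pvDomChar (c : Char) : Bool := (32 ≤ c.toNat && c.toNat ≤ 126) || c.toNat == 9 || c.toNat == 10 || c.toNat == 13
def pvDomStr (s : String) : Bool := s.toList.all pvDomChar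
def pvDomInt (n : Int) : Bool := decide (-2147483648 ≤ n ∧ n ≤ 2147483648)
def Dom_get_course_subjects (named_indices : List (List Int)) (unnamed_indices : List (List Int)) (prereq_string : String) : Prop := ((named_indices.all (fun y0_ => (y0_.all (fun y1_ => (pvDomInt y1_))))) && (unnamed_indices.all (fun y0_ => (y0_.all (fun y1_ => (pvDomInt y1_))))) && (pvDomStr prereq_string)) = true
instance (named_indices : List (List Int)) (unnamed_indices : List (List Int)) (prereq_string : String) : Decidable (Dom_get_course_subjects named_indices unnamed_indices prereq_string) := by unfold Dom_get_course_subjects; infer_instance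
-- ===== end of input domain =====

-- B replaces A's per-course rescan of named_indices by one suffix-minimum pass plus a
-- binary search per unnamed course (objective: alternative).

-- ===== PORT A =====
-- course_name.split(" ")[0]; split with a nonempty separator is never empty, so the [] arm is unreachable
def parse_out_subject (course_name : String) : String :=
  match PySem.Str.split? course_name " " with
  | some (s :: _) => s
  | _ => ""

def get_course_subjects (named_indices : List (List Int)) (unnamed_indices : List (List Int)) (prereq_string : String) : List String :=
  unnamed_indices.foldl (fun newly_named_courses un_index =>
    let closest_index := named_indices.filter (fun nc_index =>
      decide (PySem.List.pyGetD nc_index 1 0 < PySem.List.pyGetD un_index 0 0))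
    if closest_index.isEmpty then
      newly_named_courses  -- the 'continue' branch
    else
      let ci := PySem.List.pyGetD closest_index (-1) []   -- closest_index[-1]
      let recent_name := PySem.Str.slice prereq_string (some (PySem.List.pyGetD ci 0 0)) (some (PySem.List.pyGetD ci 1 0))
      let subject := parse_out_subject recent_name
      let fresh_course := subject ++ " " ++ PySem.Str.slice prereq_string (some (PySem.List.pyGetD un_index 0 0)) (some (PySem.List.pyGetD un_index 1 0))
      newly_named_courses ++ [fresh_course]) []

-- ===== PORT B =====
-- Source B's suffix-minimum pass (reverse index loop) as the obvious structural recursion: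
-- (pvSuffmins E).getD i = min of E[i:]
def pvSuffmins : List Int → List Int
  | [] => []
  | e :: t =>
    match pvSuffmins t with
    | [] => [e]
    | m :: ms => (if e < m then e else m) :: m :: ms

-- Source B's hand-written bisect_left while-loop on the suffmin array (mid = (lo+hi)//2;
-- list indices are always in range, so getD's default is never read).  The loop shrinks
-- hi - lo every iteration, so hi - lo steps of fuel make the recursion structural.
def pvBisectGo (ms : List Int) (s : Int) : Nat → Nat → Nat → Nat
  | lo, _, 0 => lo
  | lo, hi, fuel + 1 =>
    if lo < hi then
      if ms.getD ((lo + hi) / 2) 0 < s then pvBisectGo ms s ((lo + hi) / 2 + 1) hi fuel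
      else pvBisectGo ms s lo ((lo + hi) / 2) fuel
    else lo

def pvBisect (ms : List Int) (s : Int) (lo hi : Nat) : Nat := pvBisectGo ms s lo hi (hi - lo)

def get_course_subjects_alt (named_indices : List (List Int)) (unnamed_indices : List (List Int)) (prereq_string : String) : List String :=
  if named_indices.isEmpty || unnamed_indices.isEmpty then []
  else
    let suffmin := pvSuffmins (named_indices.map (fun nc => PySem.List.pyGetD nc 1 0))
    let n := named_indices.length
    unnamed_indices.foldl (fun results un =>
      let s := PySem.List.pyGetD un 0 0
      let lo := pvBisect suffmin s 0 n
      if lo = 0 then results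
      else
        let c := named_indices.getD (lo - 1) []   -- named_indices[lo-1], 0 ≤ lo-1 < n
        let subject :=
          match PySem.Str.split? (PySem.Str.slice prereq_string (some (PySem.List.pyGetD c 0 0)) (some (PySem.List.pyGetD c 1 0))) " " with
          | some (x :: _) => x
          | _ => ""
        results ++ [subject ++ " " ++ PySem.Str.slice prereq_string (some (PySem.List.pyGetD un 0 0)) (some (PySem.List.pyGetD un 1 0))]) []

-- ===== PRECONDITION & SPEC =====
-- Pre_ is exactly where Python A returns (no IndexError): whenever both index lists are
-- nonempty, every named tuple needs entries 0 and 1, every unnamed tuple needs entry 0,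
-- and entry 1 as well whenever some named tuple ends before its start (the appending branch).
def Pre_get_course_subjects (named_indices : List (List Int)) (unnamed_indices : List (List Int)) (prereq_string : String) : Prop :=
  named_indices = [] ∨ unnamed_indices = [] ∨
    ((∀ nc ∈ named_indices, 2 ≤ nc.length) ∧
     ∀ un ∈ unnamed_indices, 1 ≤ un.length ∧
       ((∃ nc ∈ named_indices, PySem.List.pyGetD nc 1 0 < PySem.List.pyGetD un 0 0) → 2 ≤ un.length))
instance (named_indices : List (List Int)) (unnamed_indices : List (List Int)) (prereq_string : String) : Decidable (Pre_get_course_subjects named_indices unnamed_indices prereq_string) := by unfold Pre_get_course_subjects; infer_instance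

def pvWitness_get_course_subjects : List (List Int) × List (List Int) × String := ([[0, 2], [6, 10]], [[11, 15], [3, 5]], "AC 101 and 102")

def Spec_get_course_subjects (named_indices : List (List Int)) (unnamed_indices : List (List Int)) (prereq_string : String) (out : List String) : Prop := out = get_course_subjects_alt named_indices unnamed_indices prereq_string
instance (named_indices : List (List Int)) (unnamed_indices : List (List Int)) (prereq_string : String) (out : List String) : Decidable (Spec_get_course_subjects named_indices unnamed_indices prereq_string out) := by unfold Spec_get_course_subjects; infer_instance

-- ===== CLAIM (what is proved, stated in full; the proofs are below) =====
def Claim_equal_get_course_subjects : Prop := ∀ (named_indices : List (List Int)) (unnamed_indices : List (List Int)) (prereq_string : String), Dom_get_course_subjects named_indices unnamed_indices prereq_string → Pre_get_course_subjects named_indices unnamed_indices prereq_string → Spec_get_course_subjects named_indices unnamed_indices prereq_string (get_course_subjects named_indices unnamed_indices prereq_string)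

-- ===== LEMMAS AND PROOFS =====

theorem pvSuffmins_length : ∀ E : List Int, (pvSuffmins E).length = E.length
  | [] => rfl
  | e :: t => by
    have ih := pvSuffmins_length t
    cases h : pvSuffmins t with
    | nil =>
      rw [h] at ih; simp only [List.length_nil] at ih
      simp only [pvSuffmins, h, List.length_cons, List.length_nil]
      omega
    | cons m ms =>
      rw [h] at ih; simp only [List.length_cons] at ih
      simp only [pvSuffmins, h, List.length_cons]
      omega

-- (pvSuffmins E) i ≤ every entry of E at or after i
theorem pvSuffmins_le : ∀ (E : List Int) (i j : Nat), i ≤ j → j < E.length →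
    (pvSuffmins E).getD i 0 ≤ E.getD j 0
  | [], i, j, _, hj => by simp at hj
  | e :: t, i, j, hij, hj => by
    cases h : pvSuffmins t with
    | nil =>
      have ht : t.length = 0 := by rw [← pvSuffmins_length t, h]; rfl
      simp only [List.length_cons, ht] at hj
      have hj0 : j = 0 := by omega
      have hi0 : i = 0 := by omega
      subst hj0; subst hi0
      simp [pvSuffmins, h]
    | cons m ms =>
      have ht : t.length = ms.length + 1 := by rw [← pvSuffmins_length t, h]; rfl
      simp only [List.length_cons] at hj
      simp only [pvSuffmins, h]
      cases j with
      | zero =>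
        have hi0 : i = 0 := by omega
        subst hi0
        simp only [List.getD_cons_zero]
        split <;> omega
      | succ j =>
        cases i with
        | zero =>
          have hm : m ≤ t.getD j 0 := by
            have := pvSuffmins_le t 0 j (Nat.zero_le _) (by omega)
            rw [h] at this; simpa using this
          simp only [List.getD_cons_zero, List.getD_cons_succ]
          split <;> omega
        | succ i =>
          have := pvSuffmins_le t i j (by omega) (by omega)
          rw [h] at this
          simpa using this

-- (pvSuffmins E) i is attained at some j ≥ i
theorem pvSuffmins_attained : ∀ (E : List Int) (i : Nat), i < E.length →
    ∃ j, i ≤ j ∧ j < E.length ∧ (pvSuffmins E).getD i 0 = E.getD j 0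
  | [], i, hi => by simp at hi
  | e :: t, i, hi => by
    cases h : pvSuffmins t with
    | nil =>
      have ht : t.length = 0 := by rw [← pvSuffmins_length t, h]; rfl
      have hi0 : i = 0 := by simp only [List.length_cons, ht] at hi; omega
      subst hi0
      exact ⟨0, le_refl 0, by simp, by simp [pvSuffmins, h]⟩
    | cons m ms =>
      have ht : t.length = ms.length + 1 := by rw [← pvSuffmins_length t, h]; rfl
      simp only [List.length_cons] at hi
      cases i with
      | zero =>
        by_cases hem : e < m
        · exact ⟨0, le_refl 0, by simp, by simp [pvSuffmins, h, if_pos hem]⟩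
        · obtain ⟨j, hj1, hj2, hj3⟩ := pvSuffmins_attained t 0 (by omega)
          rw [h] at hj3; simp only [List.getD_cons_zero] at hj3
          exact ⟨j + 1, by omega, by simp only [List.length_cons]; omega, by
            simp only [pvSuffmins, h, List.getD_cons_zero, List.getD_cons_succ, if_neg hem]
            exact hj3⟩
      | succ i =>
        obtain ⟨j, hj1, hj2, hj3⟩ := pvSuffmins_attained t i (by omega)
        rw [h] at hj3
        exact ⟨j + 1, by omega, by simp only [List.length_cons]; omega, by
          simp only [pvSuffmins, h, List.getD_cons_succ]
          exact hj3⟩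

theorem pvSuffmins_mono (E : List Int) (i j : Nat) (hij : i ≤ j) (hj : j < E.length) :
    (pvSuffmins E).getD i 0 ≤ (pvSuffmins E).getD j 0 := by
  obtain ⟨k, hjk, hk, heq⟩ := pvSuffmins_attained E j hj
  rw [heq]
  exact pvSuffmins_le E i k (le_trans hij hjk) hk

-- invariant of Source B's binary search: it returns the split point of s in a non-decreasing array
theorem pvBisectGo_inv (M : List Int) (s : Int)
    (mono : ∀ i j, i ≤ j → j < M.length → M.getD i 0 ≤ M.getD j 0) :
    ∀ (fuel lo hi : Nat), hi - lo ≤ fuel → lo ≤ hi → hi ≤ M.length →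
    (∀ i < lo, M.getD i 0 < s) →
    (∀ i, hi ≤ i → i < M.length → ¬ M.getD i 0 < s) →
    lo ≤ pvBisectGo M s lo hi fuel ∧ pvBisectGo M s lo hi fuel ≤ hi ∧
      (∀ i < pvBisectGo M s lo hi fuel, M.getD i 0 < s) ∧
      (∀ i, pvBisectGo M s lo hi fuel ≤ i → i < M.length → ¬ M.getD i 0 < s) := by
  intro fuel
  induction fuel with
  | zero =>
    intro lo hi hfuel hle hhi hbelow habove
    have : lo = hi := by omega
    subst this
    exact ⟨le_refl _, le_refl _, hbelow, habove⟩
  | succ fuel ih =>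
    intro lo hi hfuel hle hhi hbelow habove
    simp only [pvBisectGo]
    by_cases h : lo < hi
    · rw [if_pos h]
      by_cases hc : M.getD ((lo + hi) / 2) 0 < s
      · rw [if_pos hc]
        obtain ⟨h1, h2, h3, h4⟩ := ih ((lo + hi) / 2 + 1) hi (by omega) (by omega) hhi
          (fun i hi' => lt_of_le_of_lt (mono i ((lo + hi) / 2) (by omega) (by omega)) hc)
          habove
        exact ⟨by omega, h2, h3, h4⟩
      · rw [if_neg hc]
        obtain ⟨h1, h2, h3, h4⟩ := ih lo ((lo + hi) / 2) (by omega) (by omega) (by omega) hbelow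
          (fun i h1 h2 hlt => hc (lt_of_le_of_lt (mono ((lo + hi) / 2) i h1 h2) hlt))
        exact ⟨h1, by omega, h3, h4⟩
    · rw [if_neg h]
      have : lo = hi := by omega
      subst this
      exact ⟨le_refl _, le_refl _, hbelow, habove⟩

theorem pvBisect_inv (M : List Int) (s : Int)
    (mono : ∀ i j, i ≤ j → j < M.length → M.getD i 0 ≤ M.getD j 0)
    (lo hi : Nat) (hle : lo ≤ hi) (hhi : hi ≤ M.length)
    (hbelow : ∀ i < lo, M.getD i 0 < s)
    (habove : ∀ i, hi ≤ i → i < M.length → ¬ M.getD i 0 < s) :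
    lo ≤ pvBisect M s lo hi ∧ pvBisect M s lo hi ≤ hi ∧
      (∀ i < pvBisect M s lo hi, M.getD i 0 < s) ∧
      (∀ i, pvBisect M s lo hi ≤ i → i < M.length → ¬ M.getD i 0 < s) :=
  pvBisectGo_inv M s mono (hi - lo) lo hi (le_refl _) hle hhi hbelow habove

-- last element of a filtered list, located by the index of the last passing element
theorem filter_getLast_eq {α : Type} (l : List α) (p : α → Bool) (k : Nat)
    (hk : k < l.length) (hpk : p (l[k]'hk) = true)
    (hafter : ∀ j (hj : j < l.length), k < j → p (l[j]'hj) = false) :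
    (l.filter p).getLast? = some (l[k]'hk) := by
  have hdrop : (l.drop (k + 1)).filter p = [] := by
    rw [List.filter_eq_nil_iff]
    intro a ha
    obtain ⟨j, hj, rfl⟩ := List.mem_iff_getElem.mp ha
    rw [List.getElem_drop]
    simp [hafter (k + 1 + j) (by simp at hj; omega) (by omega)]
  have htake : l.take (k + 1) = l.take k ++ [l[k]'hk] := by
    rw [List.take_add_one]; simp [List.getElem?_eq_getElem hk]
  conv_lhs => rw [← List.take_append_drop (k + 1) l]
  rw [List.filter_append, hdrop, List.append_nil, htake, List.filter_append]
  simp [hpk]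

-- the crux: the bisect point over the suffix minima locates exactly the last
-- named index whose end position precedes s
theorem pvCrux (named : List (List Int)) (s : Int) :
    (pvBisect (pvSuffmins (named.map (fun nc => PySem.List.pyGetD nc 1 0))) s 0 named.length = 0 ↔
      named.filter (fun nc => decide (PySem.List.pyGetD nc 1 0 < s)) = []) ∧
    (pvBisect (pvSuffmins (named.map (fun nc => PySem.List.pyGetD nc 1 0))) s 0 named.length ≠ 0 →
      (named.filter (fun nc => decide (PySem.List.pyGetD nc 1 0 < s))).getLast? =
        some (named.getD (pvBisect (pvSuffmins (named.map (fun nc => PySem.List.pyGetD nc 1 0))) s 0 named.length - 1) [])) := by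
  have hlenE : (named.map (fun nc => PySem.List.pyGetD nc 1 0)).length = named.length := by simp
  have hlenM : (pvSuffmins (named.map (fun nc => PySem.List.pyGetD nc 1 0))).length = named.length := by
    rw [pvSuffmins_length]; exact hlenE
  obtain ⟨h0, hr, hlt, hge⟩ := pvBisect_inv (pvSuffmins (named.map (fun nc => PySem.List.pyGetD nc 1 0))) s
    (fun i j hij hj => pvSuffmins_mono _ i j hij (by omega))
    0 named.length (Nat.zero_le _) (by omega)
    (by omega) (fun i h1 h2 => absurd h2 (by omega))
  set r := pvBisect (pvSuffmins (named.map (fun nc => PySem.List.pyGetD nc 1 0))) s 0 named.length with hr_def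
  have hEj : ∀ j (hj : j < named.length),
      (named.map (fun nc => PySem.List.pyGetD nc 1 0)).getD j 0 = PySem.List.pyGetD (named[j]'hj) 1 0 := by
    intro j hj
    rw [List.getD_eq_getElem?_getD, List.getElem?_map, List.getElem?_eq_getElem hj]
    rfl
  have hafter : ∀ j (hj : j < named.length), r ≤ j → ¬ PySem.List.pyGetD (named[j]'hj) 1 0 < s := by
    intro j hj hrj hlt'
    refine hge j hrj (by omega) ?_
    calc (pvSuffmins (named.map fun nc => PySem.List.pyGetD nc 1 0)).getD j 0
        ≤ (named.map fun nc => PySem.List.pyGetD nc 1 0).getD j 0 :=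
          pvSuffmins_le _ j j (le_refl _) (by omega)
      _ < s := by rw [hEj j hj]; exact hlt'
  have hpass : ∀ _hz : r ≠ 0, ∀ hrm : r - 1 < named.length, PySem.List.pyGetD (named[r - 1]'hrm) 1 0 < s := by
    intro hz hrm
    have hM := hlt (r - 1) (by omega)
    obtain ⟨j, hj1, hj2, hj3⟩ :=
      pvSuffmins_attained (named.map (fun nc => PySem.List.pyGetD nc 1 0)) (r - 1) (by omega)
    rw [hj3] at hM
    have hj2' : j < named.length := by omega
    rcases Nat.lt_or_ge j r with hcase | hcase
    · have hjr : j = r - 1 := by omega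
      subst hjr
      rw [hEj _ hj2'] at hM
      exact hM
    · exact absurd (by rw [← hEj j hj2']; exact hM) (hafter j hj2' hcase)
  constructor
  · constructor
    · intro hz
      rw [List.filter_eq_nil_iff]
      intro a ha
      obtain ⟨j, hj, rfl⟩ := List.mem_iff_getElem.mp ha
      simpa using hafter j hj (by omega)
    · intro hnil
      by_contra hz
      have hrm : r - 1 < named.length := by omega
      have hmem : (named[r - 1]'hrm) ∈ named.filter (fun nc => decide (PySem.List.pyGetD nc 1 0 < s)) := by
        rw [List.mem_filter]
        exact ⟨List.getElem_mem hrm, by simpa using hpass hz hrm⟩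
      rw [hnil] at hmem
      simp at hmem
  · intro hz
    have hrm : r - 1 < named.length := by omega
    rw [filter_getLast_eq named _ (r - 1) hrm (by simpa using hpass hz hrm)
      (fun j hj hgt => by simpa using hafter j hj (by omega))]
    congr 1
    rw [List.getD_eq_getElem?_getD, List.getElem?_eq_getElem hrm]
    rfl

-- ===== VERDICT (by name: the statement is the Claim_ definition above) =====
theorem get_course_subjects_spec : Claim_equal_get_course_subjects := by
  intro named unnamed ps _dom _pre
  unfold Spec_get_course_subjects get_course_subjects get_course_subjects_alt
  by_cases hn : named = []
  · subst hn
    simp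
  by_cases hu : unnamed = []
  · subst hu
    simp
  rw [if_neg (by simp [hn, hu])]
  apply PySem.List.foldl_congr_mem
  intro acc un _hmem
  obtain ⟨hiff, hlast⟩ := pvCrux named (PySem.List.pyGetD un 0 0)
  by_cases h0 : pvBisect (pvSuffmins (named.map (fun nc => PySem.List.pyGetD nc 1 0))) (PySem.List.pyGetD un 0 0) 0 named.length = 0
  · simp [h0, hiff.mp h0]
  · have hne : named.filter (fun nc => decide (PySem.List.pyGetD nc 1 0 < PySem.List.pyGetD un 0 0)) ≠ [] :=
      fun hh => h0 (hiff.mpr hh)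
    have hlen : 0 < (named.filter (fun nc => decide (PySem.List.pyGetD nc 1 0 < PySem.List.pyGetD un 0 0))).length :=
      List.length_pos_of_ne_nil hne
    rw [if_neg (by simpa using hne), if_neg h0]
    have hlast' := hlast h0
    rw [List.getLast?_eq_getElem?, List.getElem?_eq_getElem (by omega)] at hlast'
    have hv := Option.some.inj hlast'
    rw [PySem.List.pyGetD_neg_ofNat _ 1 [] (by omega) (by omega), hv]
    simp [parse_out_subject]
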